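-- pv_equiv track=rewrite | github.com/wanghao-github/SymmMagHam | pyspinM/pyspinMH_2_remove_comment.py | flip_direction
-- ===== SOURCE A (Python) =====
-- def flip_direction(direction):
--     """
--     Flip the sign of the first non-zero component in the direction.
--     """
--     # Split the direction string into components
--     components = direction.split()
--     # Flip the first non-zero component
--     flipped = []
--     flipped_sign = False
--     for component in components:
--         if not flipped_sign and int(component) != 0:
--             flipped.append(str(-int(component)))
--             flipped_sign = True
--         else:
--             flipped.append(component)
--     return " ".join(flipped)
-- ===== SOURCE B (Python) =====
-- def flip_direction(direction):
--     def go(cs):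
--         if not cs:
--             return []
--         head, rest = cs[0], cs[1:]
--         if int(head) == 0:
--             return [head] + go(rest)
--         return [str(-int(head))] + rest
--     return " ".join(go(direction.split()))
-- ===== Notes on version B (the rewrite author's own statement) =====
-- stated objective: simpler
-- what changed: B replaces A's iterative scan with a flipped-sign flag accumulator by a structural recursion on the token list that keeps leading zeros, flips the first non-zero token and returns the remaining tail untouched (no flag, no accumulator).
import Mathlib
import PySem

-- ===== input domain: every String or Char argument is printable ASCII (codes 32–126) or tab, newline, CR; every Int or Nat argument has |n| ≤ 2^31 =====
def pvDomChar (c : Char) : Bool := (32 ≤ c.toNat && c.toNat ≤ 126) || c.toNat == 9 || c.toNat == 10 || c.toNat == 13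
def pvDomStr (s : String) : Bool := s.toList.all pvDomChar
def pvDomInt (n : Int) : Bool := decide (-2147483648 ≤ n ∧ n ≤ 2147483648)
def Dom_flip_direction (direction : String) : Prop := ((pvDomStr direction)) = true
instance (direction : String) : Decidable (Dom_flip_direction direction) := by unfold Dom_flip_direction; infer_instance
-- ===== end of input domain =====

-- B replaces A's scan-with-flag accumulator by a structural recursion over the token list (objective: simpler).

-- ===== PORT A =====
-- one loop step of A's for-loop: state = (flipped, flipped_sign)
def pvStepA (st : List String × Bool) (component : String) : List String × Bool :=
  if !st.2 && ((PySem.Int.ofStr? component).getD 0 != 0) then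
    (st.1 ++ [PySem.Int.toStr (-((PySem.Int.ofStr? component).getD 0))], true)
  else
    (st.1 ++ [component], st.2)

def flip_direction (direction : String) : String :=
  let components := PySem.Str.split₀ direction
  let st := components.foldl pvStepA ([], false)
  PySem.Str.join " " st.1

-- ===== PORT B =====
-- B's inner recursive helper 'go'
def pvGo : List String → List String
  | [] => []
  | head :: rest =>
      if (PySem.Int.ofStr? head).getD 0 == 0 then
        head :: pvGo rest
      else
        PySem.Int.toStr (-((PySem.Int.ofStr? head).getD 0)) :: rest

def flip_direction_alt (direction : String) : String :=
  PySem.Str.join " " (pvGo (PySem.Str.split₀ direction))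

-- ===== PRECONDITION & SPEC =====
-- Pre_ excludes exactly the inputs where Python's int() raises ValueError: a component that
-- does not parse as an int and is reached by the scan (i.e. all earlier components parse to 0).
def Pre_flip_direction (direction : String) : Prop :=
  ∀ j < (PySem.Str.split₀ direction).length,
    (∀ k < j, PySem.Int.ofStr? ((PySem.Str.split₀ direction)[k]?.getD "") = some 0) →
    (PySem.Int.ofStr? ((PySem.Str.split₀ direction)[j]?.getD "")).isSome = true
instance (direction : String) : Decidable (Pre_flip_direction direction) := by
  unfold Pre_flip_direction; infer_instance

def pvWitness_flip_direction : String := "0 -2 7"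

def Spec_flip_direction (direction : String) (out : String) : Prop := out = flip_direction_alt direction
instance (direction : String) (out : String) : Decidable (Spec_flip_direction direction out) := by unfold Spec_flip_direction; infer_instance

-- ===== CLAIM (what is proved, stated in full; the proofs are below) =====
def Claim_equal_flip_direction : Prop := ∀ (direction : String), Dom_flip_direction direction → Pre_flip_direction direction → Spec_flip_direction direction (flip_direction direction)

-- ===== LEMMAS AND PROOFS =====

-- once the sign is flipped, A's loop just appends the remaining components
theorem pvFoldA_true (cs : List String) (acc : List String) :
    cs.foldl pvStepA (acc, true) = (acc ++ cs, true) := by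
  induction cs generalizing acc with
  | nil => simp
  | cons c cs ih => simp [pvStepA, ih]

-- before the sign is flipped, A's loop builds exactly B's recursion result
theorem pvFoldA_false (cs : List String) (acc : List String) :
    (cs.foldl pvStepA (acc, false)).1 = acc ++ pvGo cs := by
  induction cs generalizing acc with
  | nil => simp [pvGo]
  | cons c cs ih =>
    by_cases h : ((PySem.Int.ofStr? c).getD 0 != 0) = true
    · have h0 : ¬ ((PySem.Int.ofStr? c).getD 0 == 0) = true := by
        simpa using h
      simp [pvStepA, h, pvGo, h0, pvFoldA_true]
    · have h0 : ((PySem.Int.ofStr? c).getD 0 == 0) = true := by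
        simpa using h
      rw [List.foldl_cons, show pvStepA (acc, false) c = (acc ++ [c], false) by simp [pvStepA, h],
        ih]
      simp [pvGo, h0]

theorem flip_direction_eq_alt (direction : String) :
    flip_direction direction = flip_direction_alt direction := by
  unfold flip_direction flip_direction_alt
  dsimp only
  rw [pvFoldA_false]
  simp

-- ===== VERDICT (by name: the statement is the Claim_ definition above) =====
theorem flip_direction_spec : Claim_equal_flip_direction := by
  intro direction _ _
  unfold Spec_flip_direction
  exact flip_direction_eq_alt direction
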